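-- pv_equiv track=rewrite | github.com/arin17bishwa/myCP_sols | CC/WIPL.py | func
-- ===== SOURCE A (Python) =====
-- from collections import OrderedDict
--
-- def func(n: int, k: int, arr: list):
--     s = sum(arr)
--     if n < 2 or s < 2 * k:
--         return -1
--
--     arr.sort()
--     d1 = OrderedDict()
--     d1[arr[n - 1]] = None
--     s1 = arr[n - 1]
--     ans = -1
--     for i in range(n - 2, -1, -1):
--         d2 = OrderedDict()
--         s1 += arr[i]
--         for key in d1.keys():
--             d2[key] = None
--             d2[arr[i]] = None
--             d2[arr[i] + key] = None
--             if (key + arr[i] >= k) and (s1 - key - arr[i]) >= k: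
--                 ans = n - i
--                 break
--             if arr[i] >= k and s1 - arr[i] >= k:
--                 ans = n - i
--                 break
--         if ans != -1:
--             break
--         d1 = d2
--     return ans
-- ===== SOURCE B (Python) =====
-- def func(n: int, k: int, arr: list):
--     if n < 2 or sum(arr) < 2 * k:
--         return -1
--     arr.sort()
--     for m in range(2, n + 1):
--         tail = [arr[i] for i in range(n - m, n)]
--         tot = sum(tail)
--         sums = {0}
--         for x in tail:
--             sums |= {s + x for s in sums}
--         if any(k <= s <= tot - k for s in sums):
--             return m
--     return -1
-- ===== Notes on version B (the rewrite author's own statement) =====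
-- stated objective: simpler
-- what changed: Replaces the incremental OrderedDict-of-subset-sums grown while scanning indices downward with a per-m recomputation: for each count m of largest elements, build the set of reachable subset sums from {0} and return m as soon as some sum s satisfies k <= s <= tot-k.
import Mathlib
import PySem

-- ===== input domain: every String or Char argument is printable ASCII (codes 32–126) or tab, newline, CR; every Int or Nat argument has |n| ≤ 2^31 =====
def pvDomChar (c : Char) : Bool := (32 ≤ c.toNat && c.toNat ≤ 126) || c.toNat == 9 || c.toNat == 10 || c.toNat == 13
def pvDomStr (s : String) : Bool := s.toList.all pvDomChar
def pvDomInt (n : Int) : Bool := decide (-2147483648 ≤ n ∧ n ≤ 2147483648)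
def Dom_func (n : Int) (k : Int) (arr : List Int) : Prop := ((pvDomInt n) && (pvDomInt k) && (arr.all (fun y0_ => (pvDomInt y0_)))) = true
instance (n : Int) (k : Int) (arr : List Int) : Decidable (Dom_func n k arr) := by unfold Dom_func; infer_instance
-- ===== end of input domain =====

-- B replaces A's incremental OrderedDict of subset sums with a per-m recomputation of the
-- reachable subset sums of the m largest elements (objective: simpler). Both Pythons sort arr in
-- place after the early -1 check; the equivalence proved here is about the RETURN value (the
-- in-place sort is identical in A and B).

-- ===== PORT A =====
-- inner 'for key in d1.keys()' loop: builds d2 and may set ans (= ansv) and break; -1 = no break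
def funcInner (k a s1 ansv : Int) : List Int → PySem.Dict Int Unit → PySem.Dict Int Unit × Int
  | [], d2 => (d2, -1)
  | key :: rest, d2 =>
    let d2' := ((d2.insert key ()).insert a ()).insert (a + key) ()
    if key + a ≥ k ∧ s1 - key - a ≥ k then (d2', ansv)
    else if a ≥ k ∧ s1 - a ≥ k then (d2', ansv)
    else funcInner k a s1 ansv rest d2'

-- outer 'for i in range(n-2, -1, -1)' loop with the 'if ans != -1: break'
def funcOuter (n k : Int) (sa : List Int) : List Int → PySem.Dict Int Unit → Int → Int
  | [], _, _ => -1
  | i :: rest, d1, s1 =>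
    let a := (PySem.List.pyGet? sa i).getD 0   -- arr[i]; always in range for the i the loop reaches under Pre_
    let s1' := s1 + a
    let r := funcInner k a s1' (n - i) d1.keys PySem.Dict.empty
    if r.2 ≠ -1 then r.2 else funcOuter n k sa rest r.1 s1'

def func (n : Int) (k : Int) (arr : List Int) : Int :=
  let s := arr.sum
  if n < 2 ∨ s < 2 * k then -1
  else
    let sa := PySem.List.sorted arr (fun x => x) false
    let a0 := (PySem.List.pyGet? sa (n - 1)).getD 0   -- arr[n-1]; in range under Pre_
    funcOuter n k sa (PySem.List.pyRange (n - 2) (-1) (-1)) (PySem.Dict.empty.insert a0 ()) a0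

-- ===== PORT B =====
-- 'for x in tail: sums |= {s + x for s in sums}'
def funcAltSums : List Int → PySem.Set Int → PySem.Set Int
  | [], sums => sums
  | x :: rest, sums =>
      funcAltSums rest (PySem.Set.union sums (PySem.Set.ofList (sums.map (fun s => s + x))))

-- 'for m in range(2, n + 1)'
def funcAltLoop (n k : Int) (sa : List Int) : List Int → Int
  | [] => -1
  | m :: rest =>
    let tail := (PySem.List.pyRange (n - m) n 1).map
      (fun i => (PySem.List.pyGet? sa i).getD 0)   -- arr[i]; in range under Pre_
    let tot := tail.sum
    let sums := funcAltSums tail (PySem.Set.ofList [0])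
    if sums.any (fun s => decide (k ≤ s) && decide (s ≤ tot - k)) then m
    else funcAltLoop n k sa rest

def func_alt (n : Int) (k : Int) (arr : List Int) : Int :=
  if n < 2 ∨ arr.sum < 2 * k then -1
  else
    let sa := PySem.List.sorted arr (fun x => x) false
    funcAltLoop n k sa (PySem.List.pyRange 2 (n + 1) 1)

-- ===== PRECONDITION & SPEC =====
-- Pre_ excludes exactly the inputs on which the Pythons raise IndexError: when n ≥ 2 and
-- sum(arr) ≥ 2*k, both A and B index arr[n-1], which raises for n > len(arr).
def Pre_func (n : Int) (k : Int) (arr : List Int) : Prop :=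
  n < 2 ∨ arr.sum < 2 * k ∨ n ≤ arr.length
instance (n : Int) (k : Int) (arr : List Int) : Decidable (Pre_func n k arr) := by
  unfold Pre_func; infer_instance
def pvWitness_func : Int × Int × List Int := (3, 1, [1, 2, 3])

def Spec_func (n : Int) (k : Int) (arr : List Int) (out : Int) : Prop := out = func_alt n k arr
instance (n : Int) (k : Int) (arr : List Int) (out : Int) : Decidable (Spec_func n k arr out) := by
  unfold Spec_func; infer_instance

-- ===== CLAIM (what is proved, stated in full; the proofs are below) =====
def Claim_equal_func : Prop := ∀ (n : Int) (k : Int) (arr : List Int), Dom_func n k arr → Pre_func n k arr → Spec_func n k arr (func n k arr)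

-- ===== LEMMAS AND PROOFS =====

-- subset sums (possibly empty subset) and nonempty subset sums of a list
def SS (l : List Int) (x : Int) : Prop := ∃ t : List Int, t.Sublist l ∧ t.sum = x
def NSS (l : List Int) (x : Int) : Prop := ∃ t : List Int, t.Sublist l ∧ t ≠ [] ∧ t.sum = x

lemma sublist_compl {t l : List Int} (h : t.Sublist l) :
    ∃ u : List Int, u.Sublist l ∧ u.sum = l.sum - t.sum := by
  induction h with
  | slnil => exact ⟨[], List.Sublist.refl _, by simp⟩
  | cons a h ih =>
      obtain ⟨u, hu, hs⟩ := ih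
      exact ⟨a :: u, List.Sublist.cons₂ a hu, by simp only [List.sum_cons, hs]; ring⟩
  | cons₂ a h ih =>
      obtain ⟨u, hu, hs⟩ := ih
      exact ⟨u, List.Sublist.cons a hu, by simp only [List.sum_cons, hs]; ring⟩

lemma NSS_nil (x : Int) : ¬ NSS [] x := by
  rintro ⟨t, ht, hne, _⟩
  cases List.sublist_nil.mp ht
  exact hne rfl

lemma NSS_cons (a : Int) (l : List Int) (x : Int) :
    NSS (a :: l) x ↔ NSS l x ∨ x = a ∨ ∃ key, NSS l key ∧ x = a + key := by
  constructor
  · rintro ⟨t, ht, hne, hs⟩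
    rcases List.sublist_cons_iff.mp ht with h | ⟨r, rfl, hr⟩
    · exact Or.inl ⟨t, h, hne, hs⟩
    · rcases r with _ | ⟨b, r'⟩
      · exact Or.inr (Or.inl (by simpa using hs.symm))
      · exact Or.inr (Or.inr ⟨(b :: r').sum, ⟨b :: r', hr, by simp, rfl⟩, by simp [← hs]⟩)
  · rintro (⟨t, ht, hne, hs⟩ | rfl | ⟨key, ⟨t, ht, hne, hs⟩, rfl⟩)
    · exact ⟨t, ht.cons a, hne, hs⟩
    · exact ⟨[x], by simp, by simp, by simp⟩
    · exact ⟨a :: t, List.Sublist.cons₂ a ht, by simp, by simp [hs]⟩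

lemma NSS_self {l : List Int} (h : l ≠ []) : NSS l l.sum :=
  ⟨l, List.Sublist.refl _, h, rfl⟩

lemma NSS_singleton (a x : Int) : NSS [a] x ↔ x = a := by
  rw [NSS_cons]
  constructor
  · rintro (h | h | ⟨key, hk, _⟩)
    · exact absurd h (NSS_nil x)
    · exact h
    · exact absurd hk (NSS_nil key)
  · exact fun h => Or.inr (Or.inl h)

-- feasibility of splitting a :: l into two parts each of sum ≥ k, in both programs' phrasings
lemma feas_iff (k a : Int) (l : List Int) :
    (∃ s, SS (a :: l) s ∧ k ≤ s ∧ s ≤ (a :: l).sum - k) ↔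
      ((∃ key, NSS l key ∧ key + a ≥ k ∧ (a :: l).sum - key - a ≥ k) ∨
        (a ≥ k ∧ (a :: l).sum - a ≥ k)) := by
  constructor
  · rintro ⟨s, ⟨t, ht, rfl⟩, h1, h2⟩
    rcases List.sublist_cons_iff.mp ht with h | ⟨r, rfl, hr⟩
    · -- t avoids a: use the complement of t in l, which together with a is the other part
      obtain ⟨u, hu, hs⟩ := sublist_compl h
      rcases u with _ | ⟨b, u'⟩
      · right
        simp at hs
        constructor <;> [skip; skip] <;> simp [List.sum_cons] at h1 h2 ⊢ <;> omega
      · left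
        refine ⟨(b :: u').sum, ⟨b :: u', hu, by simp, rfl⟩, ?_, ?_⟩ <;>
          · rw [hs]; simp [List.sum_cons] at h1 h2 ⊢; omega
    · rcases r with _ | ⟨b, r'⟩
      · right; simp [List.sum_cons] at h1 h2 ⊢; constructor <;> omega
      · left
        refine ⟨(b :: r').sum, ⟨b :: r', hr, by simp, rfl⟩, ?_, ?_⟩ <;>
          · simp [List.sum_cons] at h1 h2 ⊢ <;> omega
  · rintro (⟨key, ⟨t, ht, hne, rfl⟩, h1, h2⟩ | ⟨h1, h2⟩)
    · exact ⟨a + t.sum, ⟨a :: t, List.Sublist.cons₂ a ht, by simp⟩, by omega, by omega⟩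
    · exact ⟨a, ⟨[a], by simp, by simp⟩, by omega, by omega⟩

-- A's inner loop: the returned ans
lemma inner_snd (k a s1 ansv : Int) :
    ∀ (ks : List Int) (d2 : PySem.Dict Int Unit),
      (funcInner k a s1 ansv ks d2).2 =
        if ∃ key ∈ ks, (key + a ≥ k ∧ s1 - key - a ≥ k) ∨ (a ≥ k ∧ s1 - a ≥ k) then ansv
        else -1 := by
  intro ks
  induction ks with
  | nil => intro d2; simp [funcInner]
  | cons key rest ih =>
      intro d2
      by_cases h1 : key + a ≥ k ∧ s1 - key - a ≥ k
      · have hC : ∃ key' ∈ key :: rest,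
            (key' + a ≥ k ∧ s1 - key' - a ≥ k) ∨ (a ≥ k ∧ s1 - a ≥ k) :=
          ⟨key, List.mem_cons_self, Or.inl h1⟩
        simp only [funcInner, if_pos h1, if_pos hC]
      · by_cases h2 : a ≥ k ∧ s1 - a ≥ k
        · have hC : ∃ key' ∈ key :: rest,
              (key' + a ≥ k ∧ s1 - key' - a ≥ k) ∨ (a ≥ k ∧ s1 - a ≥ k) :=
            ⟨key, List.mem_cons_self, Or.inr h2⟩
          simp only [funcInner, if_neg h1, if_pos h2, if_pos hC]
        · have hiff : (∃ key' ∈ key :: rest,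
              (key' + a ≥ k ∧ s1 - key' - a ≥ k) ∨ (a ≥ k ∧ s1 - a ≥ k)) ↔
              (∃ key' ∈ rest,
              (key' + a ≥ k ∧ s1 - key' - a ≥ k) ∨ (a ≥ k ∧ s1 - a ≥ k)) := by
            constructor
            · rintro ⟨key', hk, hc⟩
              rcases List.mem_cons.mp hk with rfl | hk
              · exact absurd hc (by tauto)
              · exact ⟨key', hk, hc⟩
            · rintro ⟨key', hk, hc⟩
              exact ⟨key', List.mem_cons_of_mem _ hk, hc⟩
          simp only [funcInner, if_neg h1, if_neg h2]
          rw [ih]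
          simp only [hiff]

-- A's inner loop: the keys of the dict it builds, when it does not break
lemma inner_fst (k a s1 ansv : Int) :
    ∀ (ks : List Int) (d2 : PySem.Dict Int Unit),
      (∀ key ∈ ks, ¬((key + a ≥ k ∧ s1 - key - a ≥ k) ∨ (a ≥ k ∧ s1 - a ≥ k))) →
      ∀ x, x ∈ (funcInner k a s1 ansv ks d2).1.keys ↔
        x ∈ d2.keys ∨ ∃ key ∈ ks, x = key ∨ x = a ∨ x = a + key := by
  intro ks
  induction ks with
  | nil => intro d2 _ x; simp [funcInner]
  | cons key rest ih =>
      intro d2 hno x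
      have h1 : ¬(key + a ≥ k ∧ s1 - key - a ≥ k) := fun h => hno key (by simp) (Or.inl h)
      have h2 : ¬(a ≥ k ∧ s1 - a ≥ k) := fun h => hno key (by simp) (Or.inr h)
      simp only [funcInner, if_neg h1, if_neg h2]
      rw [ih _ (fun key' hk => hno key' (by simp [hk]))]
      simp only [PySem.Dict.mem_keys_insert, List.mem_cons]
      constructor
      · rintro (h | h)
        · rcases h with h | h | h
          · exact Or.inr ⟨key, Or.inl rfl, Or.inr (Or.inr h)⟩
          · exact Or.inr ⟨key, Or.inl rfl, Or.inr (Or.inl h)⟩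
          · rcases h with h | h
            · exact Or.inr ⟨key, Or.inl rfl, Or.inl h⟩
            · exact Or.inl h
        · obtain ⟨key', hk, hx⟩ := h
          exact Or.inr ⟨key', Or.inr hk, hx⟩
      · rintro (h | ⟨key', hk | hk, hx⟩)
        · exact Or.inl (Or.inr (Or.inr (Or.inr h)))
        · subst hk
          rcases hx with h | h | h
          · exact Or.inl (Or.inr (Or.inr (Or.inl h)))
          · exact Or.inl (Or.inr (Or.inl h))
          · exact Or.inl (Or.inl h)
        · exact Or.inr ⟨key', hk, hx⟩

-- B's subset-sum set: membership
lemma altSums_mem :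
    ∀ (tail : List Int) (s0 : PySem.Set Int) (x : Int),
      x ∈ funcAltSums tail s0 ↔ ∃ y ∈ s0, ∃ t : List Int, t.Sublist tail ∧ x = y + t.sum := by
  intro tail
  induction tail with
  | nil =>
      intro s0 x
      simp only [funcAltSums]
      constructor
      · exact fun h => ⟨x, h, [], List.Sublist.refl _, by simp⟩
      · rintro ⟨y, hy, t, ht, rfl⟩
        cases List.sublist_nil.mp ht
        simpa using hy
  | cons b rest ih =>
      intro s0 x
      simp only [funcAltSums]
      rw [ih]
      constructor
      · rintro ⟨y, hy, t, ht, rfl⟩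
        rw [PySem.Set.mem_union] at hy
        rcases hy with hy | hy
        · exact ⟨y, hy, t, ht.cons b, rfl⟩
        · rw [PySem.Set.mem_ofList] at hy
          obtain ⟨z, hz, rfl⟩ := List.mem_map.mp hy
          exact ⟨z, hz, b :: t, List.Sublist.cons₂ b ht, by simp; ring⟩
      · rintro ⟨y, hy, t, ht, rfl⟩
        rcases List.sublist_cons_iff.mp ht with h | ⟨r, rfl, hr⟩
        · exact ⟨y, by rw [PySem.Set.mem_union]; exact Or.inl hy, t, h, rfl⟩
        · refine ⟨y + b, ?_, r, hr, by simp; ring⟩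
          rw [PySem.Set.mem_union]
          exact Or.inr (by rw [PySem.Set.mem_ofList]; exact List.mem_map.mpr ⟨y, hy, rfl⟩)

lemma altSums_mem_zero (tail : List Int) (x : Int) :
    x ∈ funcAltSums tail (PySem.Set.ofList [0]) ↔ SS tail x := by
  rw [altSums_mem]
  constructor
  · rintro ⟨y, hy, t, ht, rfl⟩
    simp [PySem.Set.ofList] at hy
    subst hy
    exact ⟨t, ht, by simp⟩
  · rintro ⟨t, ht, rfl⟩
    exact ⟨0, by simp [PySem.Set.ofList], t, ht, by simp⟩

-- B's tail: indices [a, b) of sa read out as take/drop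
lemma tail_eq (sa : List Int) (a b : Nat) (hab : a ≤ b) (hb : b ≤ sa.length) :
    (PySem.List.pyRange (a : Int) (b : Int) 1).map
        (fun i => (PySem.List.pyGet? sa i).getD 0) =
      (sa.take b).drop a := by
  rw [PySem.List.pyRange_one]
  apply List.ext_getElem
  · simp; omega
  · intro idx h1 h2
    simp only [List.getElem_map, List.getElem_range, List.getElem_drop, List.getElem_take]
    have : ((a : Int) + (idx : Int)) = ((a + idx : Nat) : Int) := by push_cast; ring
    rw [this, PySem.List.pyGet?_natCast]
    have hlt : a + idx < sa.length := by
      simp at h1 h2; omega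
    simp [List.getElem?_eq_getElem hlt]

-- the break condition of A's inner loop, phrased through the key invariant, is B's feasibility test
lemma cond_iff (k a : Int) (l : List Int) (keys : List Int) (hne : l ≠ [])
    (hinv : ∀ x, x ∈ keys ↔ NSS l x) :
    (∃ key ∈ keys, (key + a ≥ k ∧ l.sum + a - key - a ≥ k) ∨ (a ≥ k ∧ l.sum + a - a ≥ k)) ↔
      (∃ s, SS (a :: l) s ∧ k ≤ s ∧ s ≤ (a :: l).sum - k) := by
  rw [feas_iff]
  have hs : (a :: l).sum = l.sum + a := by simp [List.sum_cons]; ring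
  constructor
  · rintro ⟨key, hk, h | h⟩
    · exact Or.inl ⟨key, (hinv key).mp hk, h.1, by rw [hs]; exact h.2⟩
    · exact Or.inr ⟨h.1, by rw [hs]; exact h.2⟩
  · rintro (⟨key, hkey, h1, h2⟩ | ⟨h1, h2⟩)
    · exact ⟨key, (hinv key).mpr hkey, Or.inl ⟨h1, by rw [hs] at h2; exact h2⟩⟩
    · exact ⟨l.sum, (hinv _).mpr (NSS_self hne), Or.inr ⟨h1, by rw [hs] at h2; exact h2⟩⟩

-- one iteration of A's outer loop
lemma stepA (n k : Int) (sa : List Int) (j : Nat) (d1 : PySem.Dict Int Unit)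
    (hn : 2 ≤ n) (hlen : n ≤ (sa.length : Int)) (hj : (j : Int) + 2 ≤ n)
    (hinv : ∀ x, x ∈ d1.keys ↔ NSS ((sa.take n.toNat).drop (j + 1)) x) :
    ((∃ s, SS ((sa.take n.toNat).drop j) s ∧ k ≤ s ∧
          s ≤ ((sa.take n.toNat).drop j).sum - k) →
      funcOuter n k sa (PySem.List.pyRange (j : Int) (-1) (-1)) d1
        ((sa.take n.toNat).drop (j + 1)).sum = n - (j : Int))
    ∧ (¬(∃ s, SS ((sa.take n.toNat).drop j) s ∧ k ≤ s ∧
          s ≤ ((sa.take n.toNat).drop j).sum - k) →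
      funcOuter n k sa (PySem.List.pyRange (j : Int) (-1) (-1)) d1
          ((sa.take n.toNat).drop (j + 1)).sum
        = funcOuter n k sa (PySem.List.pyRange ((j : Int) - 1) (-1) (-1))
          (funcInner k ((sa.take n.toNat).drop j).headI ((sa.take n.toNat).drop j).sum
            (n - (j : Int)) d1.keys PySem.Dict.empty).1
          ((sa.take n.toNat).drop j).sum)
    ∧ (¬(∃ s, SS ((sa.take n.toNat).drop j) s ∧ k ≤ s ∧
          s ≤ ((sa.take n.toNat).drop j).sum - k) →
        ∀ x, x ∈ (funcInner k ((sa.take n.toNat).drop j).headI ((sa.take n.toNat).drop j).sum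
            (n - (j : Int)) d1.keys PySem.Dict.empty).1.keys ↔
          NSS ((sa.take n.toNat).drop j) x) := by
  have hjlen : j < sa.length := by omega
  have htl : (sa.take n.toNat).length = n.toNat := by rw [List.length_take]; omega
  have hcons : (sa.take n.toNat).drop j = sa[j] :: (sa.take n.toNat).drop (j + 1) := by
    rw [List.drop_eq_getElem_cons (by omega)]
    congr 1
    exact List.getElem_take
  have hl_ne : (sa.take n.toNat).drop (j + 1) ≠ [] := by
    intro h
    have := congrArg List.length h
    simp [htl] at this
    omega
  have hhead : ((sa.take n.toNat).drop j).headI = sa[j] := by rw [hcons]; rfl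
  have hsum : ((sa.take n.toNat).drop j).sum
      = ((sa.take n.toNat).drop (j + 1)).sum + sa[j] := by
    rw [hcons]; simp [List.sum_cons]; ring
  have ha : (PySem.List.pyGet? sa ((j : Nat) : Int)).getD 0 = sa[j] := by
    rw [PySem.List.pyGet?_natCast]
    simp [List.getElem?_eq_getElem hjlen]
  have hCiff := cond_iff k (sa[j]) ((sa.take n.toNat).drop (j + 1)) d1.keys hl_ne hinv
  rw [← hcons] at hCiff
  refine ⟨?_, ?_, ?_⟩
  · intro hC
    rw [PySem.List.pyRange_neg_one_cons (by omega : (-1 : Int) < (j : Int))]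
    simp only [funcOuter]
    rw [ha, inner_snd, if_pos (hCiff.mpr hC), if_pos (by omega : (n - (j : Int)) ≠ -1)]
  · intro hC
    rw [PySem.List.pyRange_neg_one_cons (by omega : (-1 : Int) < (j : Int))]
    simp only [funcOuter]
    rw [ha, inner_snd, if_neg (fun hc => hC (hCiff.mp hc)),
      if_neg (by simp : ¬((-1 : Int) ≠ -1)), hhead, hsum]
  · intro hC x
    rw [hhead, hsum]
    have hno : ∀ key ∈ d1.keys,
        ¬((key + sa[j] ≥ k ∧ ((sa.take n.toNat).drop (j + 1)).sum + sa[j] - key - sa[j] ≥ k) ∨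
          (sa[j] ≥ k ∧ ((sa.take n.toNat).drop (j + 1)).sum + sa[j] - sa[j] ≥ k)) := by
      intro key hk hcond
      exact hC (hCiff.mp ⟨key, hk, hcond⟩)
    rw [inner_fst k (sa[j]) _ _ d1.keys PySem.Dict.empty hno x]
    rw [hcons, NSS_cons]
    simp only [PySem.Dict.keys_empty, List.not_mem_nil, false_or]
    constructor
    · rintro ⟨key, hk, h | h | h⟩
      · exact Or.inl (by rw [h]; exact (hinv key).mp hk)
      · exact Or.inr (Or.inl h)
      · exact Or.inr (Or.inr ⟨key, (hinv key).mp hk, h⟩)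
    · rintro (h | h | ⟨key, hkey, h⟩)
      · exact ⟨x, (hinv x).mpr h, Or.inl rfl⟩
      · obtain ⟨key0, hk0⟩ : ∃ key0, key0 ∈ d1.keys :=
          ⟨_, (hinv _).mpr (NSS_self hl_ne)⟩
        exact ⟨key0, hk0, Or.inr (Or.inl h)⟩
      · exact ⟨key, (hinv key).mpr hkey, Or.inr (Or.inr h)⟩

-- one iteration of B's loop (m = n - j)
lemma stepB (n k : Int) (sa : List Int) (j : Nat)
    (hn : 2 ≤ n) (hlen : n ≤ (sa.length : Int)) (hj : (j : Int) + 2 ≤ n) :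
    ((∃ s, SS ((sa.take n.toNat).drop j) s ∧ k ≤ s ∧
          s ≤ ((sa.take n.toNat).drop j).sum - k) →
      funcAltLoop n k sa (PySem.List.pyRange (n - (j : Int)) (n + 1) 1) = n - (j : Int))
    ∧ (¬(∃ s, SS ((sa.take n.toNat).drop j) s ∧ k ≤ s ∧
          s ≤ ((sa.take n.toNat).drop j).sum - k) →
      funcAltLoop n k sa (PySem.List.pyRange (n - (j : Int)) (n + 1) 1)
        = funcAltLoop n k sa (PySem.List.pyRange (n - (j : Int) + 1) (n + 1) 1)) := by
  have h1 : n - (n - (j : Int)) = ((j : Nat) : Int) := by ring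
  have h2 : n = ((n.toNat : Nat) : Int) := by omega
  have htail : (PySem.List.pyRange (n - (n - (j : Int))) n 1).map
      (fun i => (PySem.List.pyGet? sa i).getD 0) = (sa.take n.toNat).drop j := by
    rw [h1]
    conv_lhs => rw [h2]
    exact tail_eq sa j n.toNat (by omega) (by omega)
  have hcond : ((funcAltSums ((sa.take n.toNat).drop j) (PySem.Set.ofList [0])).any
        (fun s => decide (k ≤ s) && decide (s ≤ ((sa.take n.toNat).drop j).sum - k)) = true)
      ↔ ∃ s, SS ((sa.take n.toNat).drop j) s ∧ k ≤ s ∧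
          s ≤ ((sa.take n.toNat).drop j).sum - k := by
    rw [List.any_eq_true]
    constructor
    · rintro ⟨s, hs, hp⟩
      simp only [Bool.and_eq_true, decide_eq_true_eq] at hp
      exact ⟨s, (altSums_mem_zero _ s).mp hs, hp.1, hp.2⟩
    · rintro ⟨s, hs, hle1, hle2⟩
      exact ⟨s, (altSums_mem_zero _ s).mpr hs, by simp [hle1, hle2]⟩
  constructor
  · intro hC
    rw [PySem.List.pyRange_one_cons (by omega : n - (j : Int) < n + 1)]
    simp only [funcAltLoop]
    rw [htail, if_pos (hcond.mpr hC)]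
  · intro hC
    rw [PySem.List.pyRange_one_cons (by omega : n - (j : Int) < n + 1)]
    simp only [funcAltLoop]
    rw [htail, if_neg (fun hc => hC (hcond.mp hc))]

-- the two loops agree step for step
lemma loop_eq (n k : Int) (sa : List Int) (hn : 2 ≤ n) (hlen : n ≤ (sa.length : Int)) :
    ∀ (j : Nat) (d1 : PySem.Dict Int Unit),
      (j : Int) + 2 ≤ n →
      (∀ x, x ∈ d1.keys ↔ NSS ((sa.take n.toNat).drop (j + 1)) x) →
      funcOuter n k sa (PySem.List.pyRange (j : Int) (-1) (-1)) d1
          ((sa.take n.toNat).drop (j + 1)).sum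
        = funcAltLoop n k sa (PySem.List.pyRange (n - (j : Int)) (n + 1) 1) := by
  intro j
  induction j with
  | zero =>
      intro d1 hj hinv
      obtain ⟨hA1, hA2, _⟩ := stepA n k sa 0 d1 hn hlen hj hinv
      obtain ⟨hB1, hB2⟩ := stepB n k sa 0 hn hlen hj
      by_cases hC : ∃ s, SS ((sa.take n.toNat).drop 0) s ∧ k ≤ s ∧
          s ≤ ((sa.take n.toNat).drop 0).sum - k
      · rw [hA1 hC, hB1 hC]
      · rw [hA2 hC, hB2 hC]
        have e1 : ((0 : Nat) : Int) - 1 = -1 := by simp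
        have e2 : n - ((0 : Nat) : Int) + 1 = n + 1 := by simp
        rw [e1, e2, PySem.List.pyRange_neg_one_eq_nil (by omega : (-1 : Int) ≤ -1),
          PySem.List.pyRange_one_eq_nil (by omega : n + 1 ≤ n + 1)]
        simp only [funcOuter, funcAltLoop]
  | succ j' ih =>
      intro d1 hj hinv
      obtain ⟨hA1, hA2, hA3⟩ := stepA n k sa (j' + 1) d1 hn hlen hj hinv
      obtain ⟨hB1, hB2⟩ := stepB n k sa (j' + 1) hn hlen hj
      by_cases hC : ∃ s, SS ((sa.take n.toNat).drop (j' + 1)) s ∧ k ≤ s ∧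
          s ≤ ((sa.take n.toNat).drop (j' + 1)).sum - k
      · rw [hA1 hC, hB1 hC]
      · rw [hA2 hC, hB2 hC]
        have e1 : ((j' + 1 : Nat) : Int) - 1 = (j' : Int) := by push_cast; ring
        have e2 : n - ((j' + 1 : Nat) : Int) + 1 = n - (j' : Int) := by push_cast; ring
        rw [e1, e2]
        exact ih _ (by push_cast at hj ⊢; omega) (hA3 hC)

-- ===== VERDICT (by name: the statement is the Claim_ definition above) =====
theorem func_spec : Claim_equal_func := by
  intro n k arr _ hpre
  unfold Spec_func func func_alt
  by_cases h : n < 2 ∨ arr.sum < 2 * k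
  · rw [if_pos h, if_pos h]
  · rw [if_neg h, if_neg h]
    rw [not_or, not_lt, not_lt] at h
    obtain ⟨hn', hs'⟩ := h
    have hn : 2 ≤ n := by omega
    have hlen : n ≤ (arr.length : Int) := by
      unfold Pre_func at hpre; omega
    have hlensa : (PySem.List.sorted arr (fun x => x) false).length = arr.length :=
      PySem.List.length_sorted arr (fun x => x) false
    have hlen' : n ≤ ((PySem.List.sorted arr (fun x => x) false).length : Int) := by
      rw [hlensa]; exact hlen
    set sa := PySem.List.sorted arr (fun x => x) false with hsa
    have hj : ((n.toNat - 2 : Nat) : Int) = n - 2 := by omega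
    have hjlt : n.toNat - 1 < sa.length := by omega
    have ha0 : (PySem.List.pyGet? sa (n - 1)).getD 0 = sa[n.toNat - 1] := by
      rw [show (n - 1 : Int) = ((n.toNat - 1 : Nat) : Int) from by omega,
        PySem.List.pyGet?_natCast]
      simp [List.getElem?_eq_getElem hjlt]
    have htl : (sa.take n.toNat).length = n.toNat := by rw [List.length_take]; omega
    have hdrop : (sa.take n.toNat).drop ((n.toNat - 2) + 1) = [sa[n.toNat - 1]] := by
      rw [show (n.toNat - 2) + 1 = n.toNat - 1 from by omega,
        List.drop_eq_getElem_cons (by omega)]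
      rw [List.drop_eq_nil_of_le (by omega)]
      congr 1
      exact List.getElem_take
    have hinv : ∀ x, x ∈ ((PySem.Dict.empty.insert
        ((PySem.List.pyGet? sa (n - 1)).getD 0) ()).keys) ↔
        NSS ((sa.take n.toNat).drop ((n.toNat - 2) + 1)) x := by
      intro x
      rw [hdrop, NSS_singleton, PySem.Dict.mem_keys_insert, ha0]
      simp [PySem.Dict.keys_empty]
    have key := loop_eq n k sa hn hlen' (n.toNat - 2)
      (PySem.Dict.empty.insert ((PySem.List.pyGet? sa (n - 1)).getD 0) ())
      (by omega) hinv
    rw [hdrop, hj] at key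
    rw [show n - (n - 2 : Int) = 2 from by ring] at key
    simpa [ha0] using key
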